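-- pv_equiv track=rewrite | github.com/paiml/depyler | examples/hard_lang_continuation.py | apply_cont_chain
-- ===== SOURCE A (Python) =====
-- from typing import List, Tuple
--
-- def cont_identity(value: int) -> int:
--     return value
--
-- def cont_add(value: int, addend: int) -> int:
--     return value + addend
--
-- def cont_mul(value: int, factor: int) -> int:
--     return value * factor
--
-- def apply_cont_chain(value: int, ops: List[Tuple[int, int]]) -> int:
--     result: int = value
--     for op in ops:
--         if op[0] == 0:
--             result = cont_identity(result)
--         elif op[0] == 1:
--             result = cont_add(result, op[1])
--         elif op[0] == 2:
--             result = cont_mul(result, op[1])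
--     return result
-- ===== SOURCE B (Python) =====
-- def apply_cont_chain(value, ops):
--     # Compose the whole chain into one affine map a*x + b, then apply it once.
--     a, b = 1, 0
--     for tag, arg in ops:
--         if tag == 1:
--             b += arg
--         elif tag == 2:
--             a *= arg
--             b *= arg
--     return a * value + b
-- ===== Notes on version B (the rewrite author's own statement) =====
-- stated objective: alternative
-- what changed: B composes the op chain into a single affine transform (a,b) and applies it once at the end, instead of updating the running value each step.
import Mathlib
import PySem

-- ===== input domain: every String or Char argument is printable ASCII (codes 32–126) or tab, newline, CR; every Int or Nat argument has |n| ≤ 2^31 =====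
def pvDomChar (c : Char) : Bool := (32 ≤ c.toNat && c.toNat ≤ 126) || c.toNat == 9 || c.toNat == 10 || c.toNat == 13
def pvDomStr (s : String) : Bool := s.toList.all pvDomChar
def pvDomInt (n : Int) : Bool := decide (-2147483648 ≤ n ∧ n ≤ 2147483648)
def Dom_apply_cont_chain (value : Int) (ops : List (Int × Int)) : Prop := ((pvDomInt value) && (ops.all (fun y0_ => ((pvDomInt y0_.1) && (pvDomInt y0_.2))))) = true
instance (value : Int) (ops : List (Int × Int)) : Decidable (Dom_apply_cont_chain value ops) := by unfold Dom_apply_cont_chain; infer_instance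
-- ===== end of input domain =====

-- B composes the op chain into one affine map (a,b) and applies it once at the end; same result, alternative decomposition.

-- ===== PORT A =====
def cont_identity (value : Int) : Int := value

def cont_add (value : Int) (addend : Int) : Int := value + addend

def cont_mul (value : Int) (factor : Int) : Int := value * factor

def apply_cont_chain (value : Int) (ops : List (Int × Int)) : Int :=
  ops.foldl (fun result op =>
    if op.1 = 0 then cont_identity result
    else if op.1 = 1 then cont_add result op.2
    else if op.1 = 2 then cont_mul result op.2
    else result) value

-- ===== PORT B =====
def apply_cont_chain_alt (value : Int) (ops : List (Int × Int)) : Int :=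
  let ab := ops.foldl (fun (ab : Int × Int) op =>
    if op.1 = 1 then (ab.1, ab.2 + op.2)
    else if op.1 = 2 then (ab.1 * op.2, ab.2 * op.2)
    else ab) (1, 0)
  ab.1 * value + ab.2

-- ===== PRECONDITION & SPEC =====
def Spec_apply_cont_chain (value : Int) (ops : List (Int × Int)) (out : Int) : Prop := out = apply_cont_chain_alt value ops
instance (value : Int) (ops : List (Int × Int)) (out : Int) : Decidable (Spec_apply_cont_chain value ops out) := by unfold Spec_apply_cont_chain; infer_instance

-- ===== CLAIM (what is proved, stated in full; the proofs are below) =====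
def Claim_equal_apply_cont_chain : Prop := ∀ (value : Int) (ops : List (Int × Int)), Dom_apply_cont_chain value ops → Spec_apply_cont_chain value ops (apply_cont_chain value ops)

-- ===== LEMMAS AND PROOFS =====

-- the A-fold starting from r equals a*r + b where (a,b) is B's composed affine map
theorem affine_invariant (ops : List (Int × Int)) (r a b : Int) :
    ops.foldl (fun result op =>
      if op.1 = 0 then cont_identity result
      else if op.1 = 1 then cont_add result op.2
      else if op.1 = 2 then cont_mul result op.2
      else result) (a * r + b) =
    (ops.foldl (fun (ab : Int × Int) op =>
      if op.1 = 1 then (ab.1, ab.2 + op.2)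
      else if op.1 = 2 then (ab.1 * op.2, ab.2 * op.2)
      else ab) (a, b)).1 * r +
    (ops.foldl (fun (ab : Int × Int) op =>
      if op.1 = 1 then (ab.1, ab.2 + op.2)
      else if op.1 = 2 then (ab.1 * op.2, ab.2 * op.2)
      else ab) (a, b)).2 := by
  induction ops generalizing a b with
  | nil => simp
  | cons op rest ih =>
    simp only [List.foldl_cons]
    by_cases h0 : op.1 = 0
    · simp only [h0, cont_identity]
      simpa using ih a b
    · by_cases h1 : op.1 = 1
      · simp only [h1, cont_add]
        norm_num
        have := ih a (b + op.2)
        rw [show a * r + b + op.2 = a * r + (b + op.2) by ring]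
        exact this
      · by_cases h2 : op.1 = 2
        · simp only [h2, cont_mul]
          norm_num
          have := ih (a * op.2) (b * op.2)
          rw [show (a * r + b) * op.2 = a * op.2 * r + b * op.2 by ring]
          exact this
        · norm_num [h0, h1, h2]
          exact ih a b

-- ===== VERDICT (by name: the statement is the Claim_ definition above) =====
theorem apply_cont_chain_spec : Claim_equal_apply_cont_chain := by
  intro value ops _
  unfold Spec_apply_cont_chain apply_cont_chain apply_cont_chain_alt
  have := affine_invariant ops value 1 0
  simpa using this
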